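-- pv_equiv track=rewrite | github.com/mannefedov/machine_learning_study | language_detection/feature_extractor.py | count_uniq
-- ===== SOURCE A (Python) =====
-- from collections import Counter
--
-- def count_uniq(text):
--     text = text.lower().split()
--     text = [x.strip() for x in text if x.isalpha()]
--     c = Counter()
--     for word in text:
--         for letter in word:
--             c.update(letter)
--     c = [x for x in c.most_common() if x[1] > 3]
--     return len(c)
-- ===== SOURCE B (Python) =====
-- def count_uniq(text):
--     words = [x.strip() for x in text.lower().split() if x.isalpha()]
--     s = sorted(c for w in words for c in w)
--     prev = None
--     run = 0
--     total = 0
--     for ch in s: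
--         if prev == ch:
--             run += 1
--         else:
--             if run > 3:
--                 total += 1
--             prev = ch
--             run = 1
--     if run > 3:
--         total += 1
--     return total
-- ===== Notes on version B (the rewrite author's own statement) =====
-- stated objective: alternative
-- what changed: Replaces A's Counter hash tally plus most_common frequency sort by concatenating the letters of the surviving words, sorting them once, and counting consecutive equal-letter runs longer than 3 in a single scan.
import Mathlib
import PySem

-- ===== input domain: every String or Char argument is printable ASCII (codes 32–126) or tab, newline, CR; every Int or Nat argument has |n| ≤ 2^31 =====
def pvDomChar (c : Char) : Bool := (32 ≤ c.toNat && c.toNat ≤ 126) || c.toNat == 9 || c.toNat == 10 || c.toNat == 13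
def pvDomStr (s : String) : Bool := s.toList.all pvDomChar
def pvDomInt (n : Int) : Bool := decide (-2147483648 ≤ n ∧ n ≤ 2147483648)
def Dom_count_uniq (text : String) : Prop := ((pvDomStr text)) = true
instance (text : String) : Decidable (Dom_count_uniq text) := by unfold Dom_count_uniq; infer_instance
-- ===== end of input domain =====

-- B replaces A's Counter hash tally and frequency-sorted most_common pass by sorting the
-- concatenated letters once and scanning consecutive equal-letter runs (objective: alternative).

-- ===== PORT A =====
-- A: lower+split, keep alphabetic words (stripped), tally every letter in a Counter,
-- then count the most_common entries with count > 3.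
def count_uniq (text : String) : Int :=
  let ws := ((PySem.Str.split₀ (PySem.Str.lower text)).filter (fun x => PySem.Str.strIsalpha x)).map (fun x => PySem.Str.strip x)
  let c : PySem.Dict Char Int :=
    ws.foldl (fun d word => word.toList.foldl (fun d letter => d.modify letter 0 (· + 1)) d) PySem.Dict.empty
  -- c.most_common() = items sorted by count, descending (stable), then filter count > 3
  let mc := (PySem.List.sorted c.items (fun p => p.2) true).filter (fun p => decide (p.2 > 3))
  (mc.length : Int)

-- ===== PORT B =====
-- one step of B's scan: state = (prev, run, total)
def bstep : (Option Char × Int × Int) → Char → (Option Char × Int × Int)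
  | (prev, run, total), ch =>
    if prev = some ch then (prev, run + 1, total)
    else (some ch, 1, total + (if run > 3 then 1 else 0))

def count_uniq_alt (text : String) : Int :=
  let words := ((PySem.Str.split₀ (PySem.Str.lower text)).filter (fun x => PySem.Str.strIsalpha x)).map (fun x => PySem.Str.strip x)
  let s := PySem.List.sorted (words.flatMap (fun w => w.toList)) (fun c => c) false
  let st := s.foldl bstep ((none : Option Char), (0 : Int), (0 : Int))
  st.2.2 + (if st.2.1 > 3 then 1 else 0)

-- ===== PRECONDITION & SPEC =====
def Spec_count_uniq (text : String) (out : Int) : Prop := out = count_uniq_alt text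
instance (text : String) (out : Int) : Decidable (Spec_count_uniq text out) := by unfold Spec_count_uniq; infer_instance

-- ===== CLAIM (what is proved, stated in full; the proofs are below) =====
def Claim_equal_count_uniq : Prop := ∀ (text : String), Dom_count_uniq text → Spec_count_uniq text (count_uniq text)

-- ===== LEMMAS AND PROOFS =====

-- the nested per-word tally loop is the flat tally over all letters
theorem foldl_nested (ws : List String) (d : PySem.Dict Char Int) :
    ws.foldl (fun d word => word.toList.foldl (fun d letter => d.modify letter 0 (· + 1)) d) d
      = (ws.flatMap (fun w => w.toList)).foldl (fun d letter => d.modify letter 0 (· + 1)) d := by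
  induction ws generalizing d with
  | nil => rfl
  | cons w t ih => simp [List.flatMap_cons, List.foldl_append, ih]

-- a sorted nonempty list is a run of its head followed by strictly larger elements
theorem run_decomp (c : Char) (t : List Char) (h : (c :: t).Pairwise (· ≤ ·)) :
    ∃ m rest, c :: t = List.replicate (m + 1) c ++ rest ∧ rest.Pairwise (· ≤ ·) ∧ ∀ x ∈ rest, c < x := by
  induction t with
  | nil => exact ⟨0, [], rfl, List.Pairwise.nil, by simp⟩
  | cons b t' ih =>
    have hcb : c ≤ b := (List.pairwise_cons.1 h).1 b (by simp)
    have hbt : (b :: t').Pairwise (· ≤ ·) := (List.pairwise_cons.1 h).2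
    by_cases hcb' : c = b
    · subst hcb'
      have h' : (c :: t').Pairwise (· ≤ ·) := hbt
      have h'' : (c :: c :: t').Pairwise (· ≤ ·) := h
      obtain ⟨m, rest, heq, hp, hlt⟩ := ih (by
        -- pairwise for c :: t' needed by ih; ih expects (c :: t').Pairwise
        exact h')
      exact ⟨m + 1, rest, by simpa [List.replicate_succ] using congrArg (List.cons c) heq, hp, hlt⟩
    · refine ⟨0, b :: t', by simp [List.replicate_succ], hbt, ?_⟩
      intro x hx
      rcases List.mem_cons.1 hx with rfl | hx'
      · exact lt_of_le_of_ne hcb hcb'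
      · exact lt_of_lt_of_le (lt_of_le_of_ne hcb hcb') ((List.pairwise_cons.1 hbt).1 x hx')

-- B's scan through a run of the current character just increments run
theorem foldl_bstep_replicate (m : Nat) (c : Char) (r t : Int) :
    (List.replicate m c).foldl bstep (some c, r, t) = (some c, r + m, t) := by
  induction m generalizing r with
  | zero => simp
  | succ k ih =>
    rw [List.replicate_succ, List.foldl_cons]
    have h1 : bstep (some c, r, t) c = (some c, r + 1, t) := by simp [bstep]
    rw [h1, ih]
    simp only [Prod.mk.injEq, true_and, and_true]
    push_cast
    ring

-- main invariant of B's run scan over a sorted list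
theorem bmain : ∀ (n : Nat) (L : List Char), L.length ≤ n → L.Pairwise (· ≤ ·) →
    ∀ (prev : Option Char) (r t : Int), (∀ x ∈ L, prev ≠ some x) →
    (L.foldl bstep (prev, r, t)).2.2 + (if (L.foldl bstep (prev, r, t)).2.1 > 3 then 1 else 0)
      = t + (if r > 3 then 1 else 0)
        + ((PySem.Set.ofList L).countP (fun c => decide (3 < L.count c)) : Int) := by
  intro n
  induction n with
  | zero =>
    intro L hlen _ prev r t _
    have : L = [] := List.length_eq_zero_iff.1 (Nat.le_zero.1 hlen)
    subst this
    simp [PySem.Set.ofList]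
  | succ n ih =>
    intro L hlen hs prev r t hp
    cases L with
    | nil => simp [PySem.Set.ofList]
    | cons c tl =>
      obtain ⟨m, rest, heq, hrp, hlt⟩ := run_decomp c tl hs
      have hcnot : c ∉ rest := fun h => lt_irrefl c (hlt c h)
      have hlen' : rest.length ≤ n := by
        have hl2 := congrArg List.length heq
        simp [List.length_replicate, List.length_cons] at hl2
        simp [List.length_cons] at hlen
        omega
      have hstep1 : bstep (prev, r, t) c = (some c, 1, t + (if r > 3 then 1 else 0)) := by
        have : prev ≠ some c := hp c (by simp)
        simp [bstep, this]
      rw [heq, List.foldl_append]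
      have hrun : (List.replicate (m + 1) c).foldl bstep (prev, r, t)
          = (some c, 1 + (m : Int), t + (if r > 3 then 1 else 0)) := by
        rw [List.replicate_succ, List.foldl_cons, hstep1, foldl_bstep_replicate]
      rw [hrun]
      have hp' : ∀ x ∈ rest, (some c : Option Char) ≠ some x := by
        intro x hx h
        exact absurd (Option.some.inj h) (ne_of_lt (hlt x hx))
      rw [ih rest hlen' hrp (some c) (1 + (m : Int)) _ hp']
      have hnodup2 : (c :: PySem.Set.ofList rest).Nodup := by
        refine List.nodup_cons.2 ⟨?_, PySem.Set.nodup_ofList rest⟩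
        intro h
        exact hcnot ((PySem.Set.mem_ofList _ _).1 h)
      have hperm : (PySem.Set.ofList (List.replicate (m + 1) c ++ rest)).Perm (c :: PySem.Set.ofList rest) := by
        rw [List.perm_ext_iff_of_nodup (PySem.Set.nodup_ofList _) hnodup2]
        intro a
        simp [PySem.Set.mem_ofList, List.mem_replicate]
      have hcountc : (List.replicate (m + 1) c ++ rest).count c = m + 1 := by
        simp [List.count_append, List.count_eq_zero_of_not_mem hcnot]
      have hcountrest : ∀ x ∈ PySem.Set.ofList rest,
          (decide (3 < (List.replicate (m + 1) c ++ rest).count x) = true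
            ↔ decide (3 < rest.count x) = true) := by
        intro x hx
        have hxr : x ∈ rest := (PySem.Set.mem_ofList _ _).1 hx
        have hxc : c ≠ x := ne_of_lt (hlt x hxr)
        simp [List.count_append, List.count_replicate, hxc]
      have hpc : (PySem.Set.ofList (List.replicate (m + 1) c ++ rest)).countP
            (fun c' => decide (3 < (List.replicate (m + 1) c ++ rest).count c'))
          = (PySem.Set.ofList rest).countP (fun c' => decide (3 < rest.count c'))
            + (if 3 < m + 1 then 1 else 0) := by
        rw [hperm.countP_eq, List.countP_cons, List.countP_congr hcountrest, hcountc]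
        simp
      rw [hpc]
      push_cast
      split_ifs <;> omega

-- A's result, for any word list: the number of distinct letters occurring more than 3 times
theorem aside (ws : List String) :
    ((((PySem.List.sorted
        (ws.foldl (fun d word => word.toList.foldl (fun d letter => d.modify letter 0 (· + 1)) d)
          (PySem.Dict.empty : PySem.Dict Char Int)).items (fun p => p.2) true).filter
        (fun p => decide (p.2 > 3))).length : Int))
      = ((PySem.Set.ofList (ws.flatMap (fun w => w.toList))).countP
          (fun k => decide (3 < (ws.flatMap (fun w => w.toList)).count k)) : Int) := by
  rw [foldl_nested, ← PySem.Dict.counter_eq_foldl]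
  rw [← List.countP_eq_length_filter]
  rw [(PySem.List.sorted_perm _ _ _).countP_eq]
  rw [PySem.Dict.items_counter]
  rw [List.countP_map]
  congr 1
  apply List.countP_congr
  intro x _
  simp only [Function.comp, decide_eq_true_eq, gt_iff_lt]
  omega

-- B's scan, for any letter list: the same count
theorem bside' (letters : List Char) :
    ((PySem.List.sorted letters (fun c => c) false).foldl bstep ((none : Option Char), (0 : Int), (0 : Int))).2.2
      + (if ((PySem.List.sorted letters (fun c => c) false).foldl bstep ((none : Option Char), (0 : Int), (0 : Int))).2.1 > 3 then 1 else 0)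
      = ((PySem.Set.ofList letters).countP (fun k => decide (3 < letters.count k)) : Int) := by
  have hperm := PySem.List.sorted_perm letters (fun c => c) false
  have h := bmain (PySem.List.sorted letters (fun c => c) false).length
    (PySem.List.sorted letters (fun c => c) false) le_rfl
    (PySem.List.sorted_pairwise letters (fun c => c)) none 0 0 (by simp)
  rw [h]
  have h1 : ∀ x ∈ PySem.Set.ofList (PySem.List.sorted letters (fun c => c) false),
      (decide (3 < (PySem.List.sorted letters (fun c => c) false).count x) = true
        ↔ decide (3 < letters.count x) = true) := by
    intro x _
    rw [hperm.count_eq]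
  have h2 : (PySem.Set.ofList (PySem.List.sorted letters (fun c => c) false)).Perm
      (PySem.Set.ofList letters) := by
    rw [List.perm_ext_iff_of_nodup (PySem.Set.nodup_ofList _) (PySem.Set.nodup_ofList _)]
    intro a
    rw [PySem.Set.mem_ofList, PySem.Set.mem_ofList, hperm.mem_iff]
  rw [List.countP_congr h1, h2.countP_eq]
  simp

-- ===== VERDICT (by name: the statement is the Claim_ definition above) =====
theorem count_uniq_spec : Claim_equal_count_uniq := by
  intro text _
  unfold Spec_count_uniq count_uniq count_uniq_alt
  rw [aside, bside']
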